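-- pv_equiv track=rewrite | github.com/HelenHighwater1/wonderschool | scripts/scrape.py | strip_series_intro_lines
-- ===== SOURCE A (Python) =====
-- def strip_series_intro_lines(text: str) -> str:
--     """Line-based fallback: drop the series intro line and the sibling-link titles that follow."""
--     if not text or "this post is a part of our series" not in text.lower():
--         return text
--     lines = text.split("\n")
--     out: list[str] = []
--     skipping = False
--     drops = 0
--     for line in lines:
--         if not skipping and "this post is a part of our series" in line.lower():
--             skipping = True
--             drops = 0
--             continue
--         if skipping:
--             stripped = line.strip()
--             n_words = len(stripped.split())
--             ends_term = bool(stripped) and stripped[-1] in {".", "?", "!", ":"}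
--             looks_like_title_link = (
--                 drops < 12
--                 and stripped
--                 and not ends_term
--                 and n_words < 10
--                 and len(stripped) < 80
--             )
--             if looks_like_title_link:
--                 drops += 1
--                 continue
--             skipping = False
--         out.append(line)
--     return "\n".join(out)
-- ===== SOURCE B (Python) =====
-- MARKER = "this post is a part of our series"
--
--
-- def _is_title_link(line: str) -> bool:
--     s = line.strip()
--     return bool(s) and s[-1] not in ".?!:" and len(s.split()) < 10 and len(s) < 80
--
--
-- def strip_series_intro_lines(text: str) -> str:
--     """Block decomposition: repeatedly search for the next marker line, copy the
--     slice before it, slice off the capped run of title-link lines after it, emit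
--     the run-ending line directly, and continue on the remaining suffix."""
--     if not text or MARKER not in text.lower():
--         return text
--     kept: list[str] = []
--     rest = text.split("\n")
--     while True:
--         idx = next((j for j, l in enumerate(rest) if MARKER in l.lower()), None)
--         if idx is None:
--             kept.extend(rest)
--             break
--         kept.extend(rest[:idx])
--         tail = rest[idx + 1:]
--         k = 0
--         while k < len(tail) and k < 12 and _is_title_link(tail[k]):
--             k += 1
--         if k < len(tail):
--             kept.append(tail[k])
--         rest = tail[k + 1:]
--     return "\n".join(kept)
-- ===== Notes on version B (the rewrite author's own statement) =====
-- stated objective: alternative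
-- what changed: Replaced A's per-line state machine (skipping flag and drops counter threaded through one fold over every line) with a block decomposition: repeatedly search for the index of the next marker line, copy the slice before it wholesale, slice off the capped run of title-link lines after it, emit the run-ending line, and recurse on the remaining suffix.
import Mathlib
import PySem

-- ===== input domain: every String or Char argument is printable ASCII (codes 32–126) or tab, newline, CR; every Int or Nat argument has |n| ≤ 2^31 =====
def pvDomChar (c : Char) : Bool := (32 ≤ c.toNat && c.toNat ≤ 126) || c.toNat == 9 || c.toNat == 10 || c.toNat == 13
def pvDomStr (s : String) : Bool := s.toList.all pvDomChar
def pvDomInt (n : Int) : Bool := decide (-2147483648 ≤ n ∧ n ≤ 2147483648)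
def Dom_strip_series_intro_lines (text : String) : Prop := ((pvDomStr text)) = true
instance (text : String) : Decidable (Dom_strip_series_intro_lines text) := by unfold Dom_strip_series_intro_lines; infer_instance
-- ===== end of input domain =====

-- B replaces A's per-line skipping-flag state machine by a block decomposition
-- (search for the next marker line, slice, drop the capped title-link run, recurse);
-- same O(n) cost, different decomposition (objective: alternative).

def sslMarker : String := "this post is a part of our series"

-- ===== PORT A =====
-- A's looks_like_title_link computation, literally (stripped / n_words / ends_term / the conjunction)
def sslLooksA (line : String) (drops : Nat) : Bool :=
  let stripped := PySem.Str.strip line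
  let n_words := (PySem.Str.split₀ stripped).length
  let ends_term := decide (stripped ≠ "") &&
    ((PySem.Str.pyGet? stripped (-1)).elim false
      (fun c => c == '.' || c == '?' || c == '!' || c == ':'))
  decide (drops < 12) && decide (stripped ≠ "") && !ends_term &&
    decide (n_words < 10) && decide (PySem.Str.len stripped < 80)

-- A's loop body over the state (out, skipping, drops)
def sslStepA (st : List String × Bool × Nat) (line : String) : List String × Bool × Nat :=
  match st with
  | (out, skipping, drops) =>
    if !skipping && PySem.Str.isIn sslMarker (PySem.Str.lower line) then
      (out, true, 0)
    else if skipping then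
      (if sslLooksA line drops then (out, true, drops + 1)
       else (out ++ [line], false, drops))
    else (out ++ [line], skipping, drops)

def strip_series_intro_lines (text : String) : String :=
  if text = "" ∨ PySem.Str.isIn sslMarker (PySem.Str.lower text) = false then text
  else
    PySem.Str.join "\n" ((((PySem.Str.split? text "\n").getD []).foldl sslStepA ([], false, 0)).1)

-- ===== PORT B =====
-- Source B's _is_title_link
def sslIsTitle (line : String) : Bool :=
  let s := PySem.Str.strip line
  decide (s ≠ "") &&
    !((PySem.Str.pyGet? s (-1)).elim false
      (fun c => c == '.' || c == '?' || c == '!' || c == ':')) &&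
    decide ((PySem.Str.split₀ s).length < 10) && decide (PySem.Str.len s < 80)

-- Source B's inner while over k (list-end, cap, predicate), returning the final k
def sslK : List String → Nat → Nat
  | [], k => k
  | l :: r, k => if k < 12 && sslIsTitle l then sslK r (k + 1) else k

-- Source B's outer while over `rest` (kept becomes the appended prefix of the result)
def sslProcess (rest : List String) : List String :=
  match rest.findIdx? (fun l => PySem.Str.isIn sslMarker (PySem.Str.lower l)) with
  | none => rest
  | some idx =>
    if h : sslK (rest.drop (idx + 1)) 0 < (rest.drop (idx + 1)).length then
      rest.take idx ++ [(rest.drop (idx + 1))[sslK (rest.drop (idx + 1)) 0]] ++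
        sslProcess ((rest.drop (idx + 1)).drop (sslK (rest.drop (idx + 1)) 0 + 1))
    else rest.take idx
termination_by rest.length
decreasing_by
  simp only [List.length_drop] at h ⊢
  omega

def strip_series_intro_lines_alt (text : String) : String :=
  if text = "" ∨ PySem.Str.isIn sslMarker (PySem.Str.lower text) = false then text
  else PySem.Str.join "\n" (sslProcess ((PySem.Str.split? text "\n").getD []))

-- ===== PRECONDITION & SPEC =====
def Spec_strip_series_intro_lines (text : String) (out : String) : Prop := out = strip_series_intro_lines_alt text
instance (text : String) (out : String) : Decidable (Spec_strip_series_intro_lines text out) := by unfold Spec_strip_series_intro_lines; infer_instance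

-- ===== CLAIM (what is proved, stated in full; the proofs are below) =====
def Claim_equal_strip_series_intro_lines : Prop := ∀ (text : String), Dom_strip_series_intro_lines text → Spec_strip_series_intro_lines text (strip_series_intro_lines text)

-- ===== LEMMAS AND PROOFS =====

-- proof helpers characterising A's fold: sslSkip consumes a title-link run,
-- sslEmit is the per-line view of A's loop
def sslSkip (drops : Nat) : List String → List String
  | [] => []
  | l :: rest => if drops < 12 && sslIsTitle l then sslSkip (drops + 1) rest else l :: rest

theorem sslSkip_length_le (d : Nat) (xs : List String) : (sslSkip d xs).length ≤ xs.length := by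
  induction xs generalizing d with
  | nil => simp [sslSkip]
  | cons l rest ih =>
    simp only [sslSkip]
    split
    · exact Nat.le_trans (ih _) (Nat.le_succ _)
    · simp

def sslEmit : List String → List String
  | [] => []
  | line :: rest =>
    if PySem.Str.isIn sslMarker (PySem.Str.lower line) then
      match h : sslSkip 0 rest with
      | [] => []
      | l :: rest' => l :: sslEmit rest'
    else line :: sslEmit rest
termination_by xs => xs.length
decreasing_by
  · have := sslSkip_length_le 0 rest
    rw [h] at this
    simp at this ⊢
    omega
  · simp

theorem sslLooksA_eq (line : String) (d : Nat) :
    sslLooksA line d = (decide (d < 12) && sslIsTitle line) := by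
  unfold sslLooksA sslIsTitle
  by_cases h : PySem.Str.strip line = "" <;> simp [h, Bool.and_assoc]

theorem sslEmit_marker (line : String) (rest : List String)
    (hm : PySem.Chars.isIn sslMarker.toList (PySem.Chars.lower line.toList) = true) :
    sslEmit (line :: rest) = (match sslSkip 0 rest with
      | [] => []
      | l :: rest' => l :: sslEmit rest') := by
  rw [sslEmit]
  simp only [PySem.Str.isIn_eq, PySem.Str.toList_lower, hm]
  cases hs : sslSkip 0 rest <;> simp

theorem sslEmit_nomarker (line : String) (rest : List String)
    (hm : PySem.Chars.isIn sslMarker.toList (PySem.Chars.lower line.toList) = false) :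
    sslEmit (line :: rest) = line :: sslEmit rest := by
  rw [sslEmit]
  simp [hm]

-- A's fold equals sslEmit (emit mode) / sslSkip-then-sslEmit (skip mode)
theorem ssl_main : ∀ (n : Nat) (lines : List String), lines.length ≤ n →
    (∀ (out : List String) (d : Nat),
      (lines.foldl sslStepA (out, false, d)).1 = out ++ sslEmit lines) ∧
    (∀ (out : List String) (d : Nat),
      (lines.foldl sslStepA (out, true, d)).1 =
        out ++ (match sslSkip d lines with
                | [] => []
                | l :: rest' => l :: sslEmit rest')) := by
  intro n
  induction n with
  | zero =>
    intro lines h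
    have : lines = [] := List.length_eq_zero_iff.mp (Nat.le_zero.mp h)
    subst this
    constructor <;> intro out d <;> simp [sslEmit, sslSkip]
  | succ n ih =>
    intro lines h
    cases lines with
    | nil => constructor <;> intro out d <;> simp [sslEmit, sslSkip]
    | cons line rest =>
      have hr : rest.length ≤ n := by simpa using Nat.lt_succ_iff.mp (by simpa using h)
      constructor
      · intro out d
        by_cases hm : PySem.Chars.isIn sslMarker.toList (PySem.Chars.lower line.toList) = true
        · rw [List.foldl_cons,
            show sslStepA (out, false, d) line = (out, true, 0) from by simp [sslStepA, hm],
            (ih rest hr).2 out 0, sslEmit_marker line rest hm]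
        · rw [List.foldl_cons,
            show sslStepA (out, false, d) line = (out ++ [line], false, d) from by
              simp [sslStepA, hm],
            (ih rest hr).1 (out ++ [line]) d,
            sslEmit_nomarker line rest (Bool.eq_false_iff.mpr hm)]
          simp
      · intro out d
        by_cases hl : sslLooksA line d = true
        · rw [List.foldl_cons,
            show sslStepA (out, true, d) line = (out, true, d + 1) from by simp [sslStepA, hl],
            (ih rest hr).2 out (d + 1)]
          have ht : (decide (d < 12) && sslIsTitle line) = true := by
            rw [← sslLooksA_eq]; exact hl
          simp only [sslSkip]
          rw [if_pos (by simpa using ht)]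
        · rw [List.foldl_cons,
            show sslStepA (out, true, d) line = (out ++ [line], false, d) from by
              simp [sslStepA, hl],
            (ih rest hr).1 (out ++ [line]) d]
          have ht : (decide (d < 12) && sslIsTitle line) = false := by
            rw [← sslLooksA_eq]; exact Bool.eq_false_iff.mpr hl
          simp only [sslSkip]
          rw [if_neg (by simp_all)]
          simp

theorem sslK_ge (ts : List String) (d : Nat) : d ≤ sslK ts d := by
  induction ts generalizing d with
  | nil => simp [sslK]
  | cons l r ih =>
    simp only [sslK]
    split
    · exact Nat.le_trans (Nat.le_succ d) (ih _)
    · exact le_rfl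

theorem sslSkip_eq_drop (ts : List String) (d : Nat) :
    sslSkip d ts = ts.drop (sslK ts d - d) := by
  induction ts generalizing d with
  | nil => simp [sslSkip, sslK]
  | cons l r ih =>
    simp only [sslSkip, sslK]
    split
    · rw [ih (d + 1)]
      have := sslK_ge r (d + 1)
      have h2 : sslK r (d + 1) - d = (sslK r (d + 1) - (d + 1)) + 1 := by omega
      rw [h2, List.drop_succ_cons]
    · simp

theorem sslProcess_nomarker (line : String) (rest : List String)
    (hm : PySem.Str.isIn sslMarker (PySem.Str.lower line) = false) :
    sslProcess (line :: rest) = line :: sslProcess rest := by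
  rw [sslProcess]
  conv_rhs => rw [sslProcess]
  rw [List.findIdx?_cons, hm]
  simp only [Bool.false_eq_true, if_false]
  cases hf : rest.findIdx? (fun l => PySem.Str.isIn sslMarker (PySem.Str.lower l)) with
  | none => simp
  | some j =>
    simp only [Option.map_some, List.drop_succ_cons, List.take_succ_cons]
    split_ifs <;> simp

theorem sslEmit_eq_process : ∀ (n : Nat) (lines : List String), lines.length ≤ n →
    sslEmit lines = sslProcess lines := by
  intro n
  induction n with
  | zero =>
    intro lines h
    have : lines = [] := List.length_eq_zero_iff.mp (Nat.le_zero.mp h)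
    subst this
    rw [sslEmit, sslProcess]
    simp
  | succ n ih =>
    intro lines h
    cases lines with
    | nil => rw [sslEmit, sslProcess]; simp
    | cons line rest =>
      have hr : rest.length ≤ n := by simpa using Nat.lt_succ_iff.mp (by simpa using h)
      by_cases hm : PySem.Chars.isIn sslMarker.toList (PySem.Chars.lower line.toList) = true
      · have hmS : PySem.Str.isIn sslMarker (PySem.Str.lower line) = true := by
          simp only [PySem.Str.isIn_eq, PySem.Str.toList_lower]
          exact hm
        rw [sslEmit_marker line rest hm, sslProcess, List.findIdx?_cons, hmS]
        simp only [if_true, List.drop_succ_cons, List.drop_zero, List.take_zero,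
          List.nil_append]
        have hs : sslSkip 0 rest = rest.drop (sslK rest 0) := by
          simpa using sslSkip_eq_drop rest 0
        rw [hs]
        cases hd : rest.drop (sslK rest 0) with
        | nil =>
          have hlen : (rest.drop (sslK rest 0)).length = 0 := by rw [hd]; rfl
          rw [List.length_drop] at hlen
          rw [dif_neg (by omega)]
        | cons l r =>
          have hlen : (rest.drop (sslK rest 0)).length = r.length + 1 := by rw [hd]; rfl
          rw [List.length_drop] at hlen
          have hk : sslK rest 0 < rest.length := by omega
          rw [dif_pos hk]
          have hget : rest[sslK rest 0] = l := by
            have h0 : (rest.drop (sslK rest 0))[0]'(by rw [hd]; simp) = l := by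
              simp [hd]
            rw [List.getElem_drop] at h0
            simpa using h0
          have hdd : rest.drop (sslK rest 0 + 1) = r := by
            have : (rest.drop (sslK rest 0)).drop 1 = r := by rw [hd]; rfl
            rwa [List.drop_drop] at this
          have hrl : r.length ≤ n := by omega
          rw [hget, hdd]
          show l :: sslEmit r = [l] ++ sslProcess r
          rw [ih r hrl]
          rfl
      · have hmS : PySem.Str.isIn sslMarker (PySem.Str.lower line) = false := by
          simp only [PySem.Str.isIn_eq, PySem.Str.toList_lower]
          exact Bool.eq_false_iff.mpr hm
        rw [sslEmit_nomarker line rest (Bool.eq_false_iff.mpr hm),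
          sslProcess_nomarker line rest hmS, ih rest hr]

-- ===== VERDICT (by name: the statement is the Claim_ definition above) =====
theorem strip_series_intro_lines_spec : Claim_equal_strip_series_intro_lines := by
  intro text _
  unfold Spec_strip_series_intro_lines strip_series_intro_lines strip_series_intro_lines_alt
  split
  · rfl
  · rw [(ssl_main ((PySem.Str.split? text "\n").getD []).length
      ((PySem.Str.split? text "\n").getD []) le_rfl).1 [] 0,
      sslEmit_eq_process ((PySem.Str.split? text "\n").getD []).length
      ((PySem.Str.split? text "\n").getD []) le_rfl]
    simp
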